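-- pv_equiv track=rewrite | github.com/archangdcc/Ursa-Major | board.py | _build_ref_table
-- ===== SOURCE A (Python) =====
-- def _pick(m, n, k=4):
--     return range(max(m - k + 1, 0), min(m + 1, n - k + 1))
--
-- def _build_ref_table(col, row):
--     # Return all the possible connect-four's that contain (col, row).
--     retvar = []
--     cpr = col - row
--     cmr = col + row
--
--     for i in _pick(row, 6):
--         retvar.append((0, col, i))
--
--     for i in _pick(col, 7):
--         retvar.append((1, row, i))
--
--     if cpr >= -2 and cpr <= 0:
--         for i in _pick(row, 6 + cpr):
--             retvar.append((2, cpr + 2, i))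
--     elif cpr >= 1 and cpr <= 3:
--         for i in _pick(col, 7 - cpr):
--             retvar.append((2, cpr + 2, i))
--
--     if cmr >= 3 and cmr <= 5:
--         for i in _pick(row, 1 + cmr):
--             retvar.append((3, cmr - 3, i))
--     elif cmr >= 6 and cmr <= 8:
--         for i in _pick(col, 12 - cmr):
--             retvar.append((3, cmr - 3, i))
--     return retvar
-- ===== SOURCE B (Python) =====
-- def _build_ref_table(col, row):
--     # Generate-and-filter, in two staged passes: first list EVERY length-4
--     # window on each of the four lines through the cell (paired with the
--     # cell's coordinate along that line), then keep the windows whose span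
--     # covers that coordinate.  No clamped-range arithmetic anywhere.
--     cpr = col - row
--     cmr = col + row
--     candidates = []
--     candidates += [((0, col, i), row) for i in range(3)]       # vertical line (length 6)
--     candidates += [((1, row, i), col) for i in range(4)]       # horizontal line (length 7)
--     if -2 <= cpr <= 0:
--         candidates += [((2, cpr + 2, i), row) for i in range(3 + cpr)]
--     elif 1 <= cpr <= 3:
--         candidates += [((2, cpr + 2, i), col) for i in range(4 - cpr)]
--     if 3 <= cmr <= 5:
--         candidates += [((3, cmr - 3, i), row) for i in range(cmr - 2)]
--     elif 6 <= cmr <= 8: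
--         candidates += [((3, cmr - 3, i), col) for i in range(9 - cmr)]
--     return [w for (w, m) in candidates if w[2] <= m <= w[2] + 3]
-- ===== Notes on version B (the rewrite author's own statement) =====
-- stated objective: alternative
-- what changed: Replaces A's direct construction of each clamped range around the cell (range(max(m-3,0), min(m+1,n-3)) per direction) by a two-stage generate-and-filter: first enumerate every length-4 window on each line through the cell, then keep in a separate pass the windows whose span covers the cell's coordinate; no min/max clamping anywhere.
import Mathlib
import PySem

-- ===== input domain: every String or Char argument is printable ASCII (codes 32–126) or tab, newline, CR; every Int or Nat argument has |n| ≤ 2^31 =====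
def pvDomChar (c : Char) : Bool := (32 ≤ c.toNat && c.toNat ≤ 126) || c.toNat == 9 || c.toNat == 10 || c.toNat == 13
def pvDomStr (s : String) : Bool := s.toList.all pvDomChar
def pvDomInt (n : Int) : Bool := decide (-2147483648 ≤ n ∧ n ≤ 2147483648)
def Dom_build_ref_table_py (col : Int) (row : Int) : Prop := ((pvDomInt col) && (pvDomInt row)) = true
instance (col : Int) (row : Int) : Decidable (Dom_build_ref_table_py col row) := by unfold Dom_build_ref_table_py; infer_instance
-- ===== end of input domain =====

-- B generates EVERY length-4 window on the four lines through the cell and then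
-- filters by a containment test in a separate pass (generate-and-filter), instead
-- of A's direct construction of each clamped range around the cell; objective:
-- alternative decomposition, same cost.

-- ===== PORT A =====
-- _pick(m, n, k=4) = range(max(m - k + 1, 0), min(m + 1, n - k + 1))
def pv_pick (m n : Int) : List Int :=
  PySem.List.pyRange (max (m - 4 + 1) 0) (min (m + 1) (n - 4 + 1)) 1

def build_ref_table_py (col : Int) (row : Int) : List (Int × Int × Int) :=
  let retvar : List (Int × Int × Int) := []
  let cpr := col - row
  let cmr := col + row
  let retvar := (pv_pick row 6).foldl (fun acc i => acc ++ [(0, col, i)]) retvar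
  let retvar := (pv_pick col 7).foldl (fun acc i => acc ++ [(1, row, i)]) retvar
  let retvar :=
    if cpr ≥ -2 ∧ cpr ≤ 0 then
      (pv_pick row (6 + cpr)).foldl (fun acc i => acc ++ [(2, cpr + 2, i)]) retvar
    else if cpr ≥ 1 ∧ cpr ≤ 3 then
      (pv_pick col (7 - cpr)).foldl (fun acc i => acc ++ [(2, cpr + 2, i)]) retvar
    else retvar
  let retvar :=
    if cmr ≥ 3 ∧ cmr ≤ 5 then
      (pv_pick row (1 + cmr)).foldl (fun acc i => acc ++ [(3, cmr - 3, i)]) retvar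
    else if cmr ≥ 6 ∧ cmr ≤ 8 then
      (pv_pick col (12 - cmr)).foldl (fun acc i => acc ++ [(3, cmr - 3, i)]) retvar
    else retvar
  retvar

-- ===== PORT B =====
-- '[w for (w, m) in candidates if w[2] <= m <= w[2] + 3]' (the containment pass)
def pv_keep_containing (candidates : List ((Int × Int × Int) × Int)) : List (Int × Int × Int) :=
  (candidates.filter (fun wm => decide (wm.1.2.2 ≤ wm.2 ∧ wm.2 ≤ wm.1.2.2 + 3))).map (fun wm => wm.1)

def build_ref_table_py_alt (col : Int) (row : Int) : List (Int × Int × Int) :=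
  let cpr := col - row
  let cmr := col + row
  let candidates : List ((Int × Int × Int) × Int) := []
  let candidates := candidates ++ (PySem.List.pyRange 0 3 1).map (fun i => ((0, col, i), row))
  let candidates := candidates ++ (PySem.List.pyRange 0 4 1).map (fun i => ((1, row, i), col))
  let candidates :=
    if -2 ≤ cpr ∧ cpr ≤ 0 then
      candidates ++ (PySem.List.pyRange 0 (3 + cpr) 1).map (fun i => ((2, cpr + 2, i), row))
    else if 1 ≤ cpr ∧ cpr ≤ 3 then
      candidates ++ (PySem.List.pyRange 0 (4 - cpr) 1).map (fun i => ((2, cpr + 2, i), col))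
    else candidates
  let candidates :=
    if 3 ≤ cmr ∧ cmr ≤ 5 then
      candidates ++ (PySem.List.pyRange 0 (cmr - 2) 1).map (fun i => ((3, cmr - 3, i), row))
    else if 6 ≤ cmr ∧ cmr ≤ 8 then
      candidates ++ (PySem.List.pyRange 0 (9 - cmr) 1).map (fun i => ((3, cmr - 3, i), col))
    else candidates
  pv_keep_containing candidates

-- ===== PRECONDITION & SPEC =====
def Spec_build_ref_table_py (col : Int) (row : Int) (out : List (Int × Int × Int)) : Prop := out = build_ref_table_py_alt col row
instance (col : Int) (row : Int) (out : List (Int × Int × Int)) : Decidable (Spec_build_ref_table_py col row out) := by unfold Spec_build_ref_table_py; infer_instance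

-- ===== CLAIM =====
def Claim_equal_build_ref_table_py : Prop := ∀ (col : Int) (row : Int), Dom_build_ref_table_py col row → Spec_build_ref_table_py col row (build_ref_table_py col row)

-- ===== LEMMAS AND PROOFS =====

-- filtering the windows of a whole line (starts 0..k-1, line length k+3) by
-- containment of coordinate m yields exactly A's clamped range pick(m, k+3)
lemma pick_eq_filter (d t m k : Int) (h1 : 1 ≤ k) (h2 : k ≤ 4) :
    pv_keep_containing ((PySem.List.pyRange 0 k 1).map (fun i => ((d, t, i), m)))
      = (pv_pick m (k + 3)).map (fun i => (d, t, i)) := by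
  unfold pv_keep_containing pv_pick
  rw [PySem.List.pyRange_one, PySem.List.pyRange_one]
  interval_cases k <;>
  · simp only [show ((1:Int) - 0).toNat = 1 from rfl, show ((2:Int) - 0).toNat = 2 from rfl,
      show ((3:Int) - 0).toNat = 3 from rfl, show ((4:Int) - 0).toNat = 4 from rfl,
      List.range_succ, List.range_zero, List.map_append, List.map_cons, List.map_nil,
      List.nil_append, List.filter_append, List.filter_cons, List.filter_nil,
      decide_eq_true_eq]
    split_ifs <;>
      first
        | (exfalso; omega)
        | (rw [show (min (m + 1) _ - max (m - 4 + 1) 0).toNat = 0 from by omega]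
           simp [List.range_succ] <;> omega)
        | (rw [show (min (m + 1) _ - max (m - 4 + 1) 0).toNat = 1 from by omega]
           simp [List.range_succ] <;> omega)
        | (rw [show (min (m + 1) _ - max (m - 4 + 1) 0).toNat = 2 from by omega]
           simp [List.range_succ] <;> omega)
        | (rw [show (min (m + 1) _ - max (m - 4 + 1) 0).toNat = 3 from by omega]
           simp [List.range_succ] <;> omega)
        | (rw [show (min (m + 1) _ - max (m - 4 + 1) 0).toNat = 4 from by omega]
           simp [List.range_succ] <;> omega)

lemma keep_append (xs ys : List ((Int × Int × Int) × Int)) :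
    pv_keep_containing (xs ++ ys) = pv_keep_containing xs ++ pv_keep_containing ys := by
  unfold pv_keep_containing; rw [List.filter_append, List.map_append]

-- ===== VERDICT =====
theorem build_ref_table_py_spec : Claim_equal_build_ref_table_py := by
  intro col row _
  unfold Spec_build_ref_table_py build_ref_table_py build_ref_table_py_alt
  simp only [ge_iff_le, PySem.List.foldl_append_singleton_eq_map, List.nil_append]
  split_ifs <;>
    simp only [keep_append, List.nil_append, List.append_assoc,
      pick_eq_filter _ _ _ 3 (by omega) (by omega),
      pick_eq_filter _ _ _ 4 (by omega) (by omega)] <;>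
    first
      | rfl
      | (first
          | rw [pick_eq_filter _ _ _ (3 + (col - row)) (by omega) (by omega),
               show 3 + (col - row) + 3 = 6 + (col - row) from by ring]
          | rw [pick_eq_filter _ _ _ (4 - (col - row)) (by omega) (by omega),
               show 4 - (col - row) + 3 = 7 - (col - row) from by ring]
          | skip)
        <;> (first
          | rw [pick_eq_filter _ _ _ ((col + row) - 2) (by omega) (by omega),
               show (col + row) - 2 + 3 = 1 + (col + row) from by ring]
          | rw [pick_eq_filter _ _ _ (9 - (col + row)) (by omega) (by omega),
               show 9 - (col + row) + 3 = 12 - (col + row) from by ring]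
          | skip)
        <;> rfl
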